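-- pv_equiv track=rewrite | github.com/patricknovak/nerranetworks | digests/omni_view.py | _pick_diverse_articles
-- ===== SOURCE A (Python) =====
-- def _source_buckets():
--     # Reuse the same sets as selection logic (keep centralized)
--     left_sources = {"CNN", "New York Times", "Washington Post", "NPR", "BBC", "The Guardian", "Al Jazeera"}
--     center_sources = {"Reuters", "Wall Street Journal", "Bloomberg", "CNBC", "Real Clear Politics"}
--     right_sources = {"Fox News", "Newsmax", "Breitbart", "Daily Mail"}
--     international_sources = {"France 24", "Deutsche Welle"}
--     alternative_sources = {"The Intercept", "Mother Jones", "Reason"}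
--     tech_sources = {"Wired", "Ars Technica"}
--     return {
--         "Center/Left": left_sources,
--         "Center": center_sources,
--         "Center/Right": right_sources,
--         "International": international_sources,
--         "Independent": alternative_sources,
--         "Tech/Science": tech_sources,
--     }
--
-- def _bucket_for_source(source: str) -> str:
--     s = (source or "").strip()
--     for bucket, sources in _source_buckets().items():
--         if s in sources:
--             return bucket
--     return "Other"
--
-- def _pick_diverse_articles(cluster: dict, max_articles: int = 6) -> list[dict]:
--     """
--     Pick a diverse set of articles within a cluster, prioritizing different buckets/sources.
--     """
--     arts = list(cluster.get("articles") or [])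
--     if not arts:
--         return []
--     # newest first
--     arts.sort(key=lambda x: x.get("publishedAt", ""), reverse=True)
--
--     picked: list[dict] = []
--     used_sources: set[str] = set()
--     used_buckets: set[str] = set()
--     bucket_priority = ["Center", "Center/Left", "Center/Right", "International", "Independent", "Tech/Science", "Other"]
--
--     # First: try to get one per bucket
--     for b in bucket_priority:
--         for a in arts:
--             s = (a.get("source") or "").strip()
--             if not s or s in used_sources:
--                 continue
--             if _bucket_for_source(s) != b:
--                 continue
--             picked.append(a)
--             used_sources.add(s)
--             used_buckets.add(b)
--             break
--         if len(picked) >= max_articles: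
--             return picked
--
--     # Fill: remaining newest unique sources
--     for a in arts:
--         if len(picked) >= max_articles:
--             break
--         s = (a.get("source") or "").strip()
--         if not s or s in used_sources:
--             continue
--         picked.append(a)
--         used_sources.add(s)
--     return picked
-- ===== SOURCE B (Python) =====
-- def _source_buckets():
--     # Reuse the same sets as selection logic (keep centralized)
--     left_sources = {"CNN", "New York Times", "Washington Post", "NPR", "BBC", "The Guardian", "Al Jazeera"}
--     center_sources = {"Reuters", "Wall Street Journal", "Bloomberg", "CNBC", "Real Clear Politics"}
--     right_sources = {"Fox News", "Newsmax", "Breitbart", "Daily Mail"}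
--     international_sources = {"France 24", "Deutsche Welle"}
--     alternative_sources = {"The Intercept", "Mother Jones", "Reason"}
--     tech_sources = {"Wired", "Ars Technica"}
--     return {
--         "Center/Left": left_sources,
--         "Center": center_sources,
--         "Center/Right": right_sources,
--         "International": international_sources,
--         "Independent": alternative_sources,
--         "Tech/Science": tech_sources,
--     }
--
-- def _bucket_for_source(source: str) -> str:
--     s = (source or "").strip()
--     for bucket, sources in _source_buckets().items():
--         if s in sources:
--             return bucket
--     return "Other"
--
-- def _pick_diverse_articles(cluster: dict, max_articles: int = 6) -> list[dict]:
--     arts = sorted(cluster.get("articles") or [],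
--                   key=lambda x: x.get("publishedAt", ""), reverse=True)
--     if max_articles <= 0:
--         return []
--     # Group the newest-first articles by bias bucket, in ONE pass.  A source
--     # determines its bucket, so each bucket's representative automatically has
--     # a source unseen in every other bucket.
--     groups: dict[str, list[dict]] = {}
--     for a in arts:
--         s = (a.get("source") or "").strip()
--         if s:
--             groups.setdefault(_bucket_for_source(s), []).append(a)
--     # One representative (the newest article) per non-empty bucket, in priority order.
--     reps = [groups[b][0]
--             for b in ["Center", "Center/Left", "Center/Right", "International",
--                       "Independent", "Tech/Science", "Other"]
--             if b in groups]
--     if len(reps) >= max_articles: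
--         return reps[:max_articles]
--     # Fill with the remaining newest unique sources, then cut to the quota.
--     seen = {(a.get("source") or "").strip() for a in reps}
--     uniq = []
--     for a in arts:
--         s = (a.get("source") or "").strip()
--         if s and s not in seen:
--             seen.add(s)
--             uniq.append(a)
--     return reps + uniq[: max_articles - len(reps)]
-- ===== Notes on version B (the rewrite author's own statement) =====
-- stated objective: alternative
-- what changed: A rescans the whole article list once per bias bucket inside an early-returning loop; B groups the sorted articles by bucket in one pass, builds the per-bucket representatives as a comprehension over the priority list, and truncates arithmetically (reps[:max] or reps + dedup-fill slice) instead of checking the quota inside loops.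
-- intended difference: When max_articles <= 0 and the cluster has an article from a Center source, A still returns that one article (its quota check runs only after the first bucket), while B returns [] — the intended result for a non-positive quota. — e.g. on _pick_diverse_articles([("articles", [[("source", "Reuters")]])], 0): A returns [[("source", "Reuters")]], B returns []
import Mathlib
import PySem

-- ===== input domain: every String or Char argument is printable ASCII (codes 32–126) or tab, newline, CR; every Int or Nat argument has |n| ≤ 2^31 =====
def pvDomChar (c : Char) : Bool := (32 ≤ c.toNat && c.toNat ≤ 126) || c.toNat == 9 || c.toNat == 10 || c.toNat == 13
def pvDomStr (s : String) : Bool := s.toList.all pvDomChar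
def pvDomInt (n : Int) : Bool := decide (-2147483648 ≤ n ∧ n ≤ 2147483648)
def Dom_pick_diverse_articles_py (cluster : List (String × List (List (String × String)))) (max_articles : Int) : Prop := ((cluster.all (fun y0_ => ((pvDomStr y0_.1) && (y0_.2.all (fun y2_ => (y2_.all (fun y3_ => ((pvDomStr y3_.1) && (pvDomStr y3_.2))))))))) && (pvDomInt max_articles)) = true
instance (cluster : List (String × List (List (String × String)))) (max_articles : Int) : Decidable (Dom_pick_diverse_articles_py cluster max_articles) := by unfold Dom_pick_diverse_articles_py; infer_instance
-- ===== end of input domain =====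

-- B replaces A's early-returning per-bucket rescans by one grouping pass over the
-- sorted articles, a representatives comprehension over the priority list, and
-- arithmetic truncation (objective: alternative). Return-value equivalence only:
-- A sorts a local copy, so no caller-visible mutation.

-- shared module helpers (_source_buckets, _bucket_for_source, used by both A and B)

-- `d.get(k) or ""` / `d.get(k, "")` on string values: missing key and "" both give ""
def pvGetS (a : List (String × String)) (k : String) : String :=
  ((PySem.Dict.mk a).get? k).getD ""

def stripSrc (a : List (String × String)) : String := PySem.Str.strip (pvGetS a "source")

def sourceBuckets : List (String × PySem.Set String) :=
  [("Center/Left", PySem.Set.ofList ["CNN", "New York Times", "Washington Post", "NPR", "BBC", "The Guardian", "Al Jazeera"]),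
   ("Center", PySem.Set.ofList ["Reuters", "Wall Street Journal", "Bloomberg", "CNBC", "Real Clear Politics"]),
   ("Center/Right", PySem.Set.ofList ["Fox News", "Newsmax", "Breitbart", "Daily Mail"]),
   ("International", PySem.Set.ofList ["France 24", "Deutsche Welle"]),
   ("Independent", PySem.Set.ofList ["The Intercept", "Mother Jones", "Reason"]),
   ("Tech/Science", PySem.Set.ofList ["Wired", "Ars Technica"])]

def bucketFind : List (String × PySem.Set String) → String → String
  | [], _ => "Other"
  | (b, srcs) :: rest, s => if PySem.Set.contains srcs s then b else bucketFind rest s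

def bucketFor (source : String) : String := bucketFind sourceBuckets (PySem.Str.strip source)

def bucketPriority : List String :=
  ["Center", "Center/Left", "Center/Right", "International", "Independent", "Tech/Science", "Other"]

-- ===== PORT A =====

-- inner `for a in arts: … break` of A's first phase
def aFind : List (List (String × String)) → String → PySem.Set String → Option (List (String × String))
  | [], _, _ => none
  | a :: rest, b, used =>
    let s := stripSrc a
    if s == "" || PySem.Set.contains used s then aFind rest b used
    else if bucketFor s != b then aFind rest b used
    else some a

-- `for b in bucket_priority: …` with the early `return picked` as `.inl`;
-- A's `used_buckets` set is write-only (never read) and is omitted.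
def aPhase1 : List (List (String × String)) → List String → List (List (String × String)) → PySem.Set String → Int →
    (List (List (String × String))) ⊕ (List (List (String × String)) × PySem.Set String)
  | _, [], picked, used, _ => .inr (picked, used)
  | arts, b :: bs, picked, used, m =>
    match aFind arts b used with
    | none => if (picked.length : Int) ≥ m then .inl picked else aPhase1 arts bs picked used m
    | some a =>
      let picked' := picked ++ [a]
      let used' := PySem.Set.add used (stripSrc a)
      if (picked'.length : Int) ≥ m then .inl picked' else aPhase1 arts bs picked' used' m

-- A's fill loop
def aFill : List (List (String × String)) → List (List (String × String)) → PySem.Set String → Int → List (List (String × String))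
  | [], picked, _, _ => picked
  | a :: rest, picked, used, m =>
    if (picked.length : Int) ≥ m then picked
    else
      let s := stripSrc a
      if s == "" || PySem.Set.contains used s then aFill rest picked used m
      else aFill rest (picked ++ [a]) (PySem.Set.add used s) m

def pick_diverse_articles_py (cluster : List (String × List (List (String × String)))) (max_articles : Int) : List (List (String × String)) :=
  -- `list(cluster.get("articles") or [])` then in-place sort = sorted copy ('or []' is the identity on list values here)
  let arts := PySem.List.sorted (((PySem.Dict.mk cluster).get? "articles").getD []) (fun a => pvGetS a "publishedAt") true
  if arts.isEmpty then []
  else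
    match aPhase1 arts bucketPriority [] PySem.Set.empty max_articles with
    | .inl p => p
    | .inr (picked, used) => aFill arts picked used max_articles

-- ===== PORT B =====

-- `groups.setdefault(_bucket_for_source(s), []).append(a)` over all of arts (one pass)
def bGroups : List (List (String × String)) → PySem.Dict String (List (List (String × String))) → PySem.Dict String (List (List (String × String)))
  | [], d => d
  | a :: rest, d =>
    let s := stripSrc a
    if s == "" then bGroups rest d
    else bGroups rest (d.modify (bucketFor s) [] (· ++ [a]))

-- `[groups[b][0] for b in [...] if b in groups]`; every stored group is nonempty,
-- so `head?` under the `contains` guard is exactly Python's `groups[b][0]`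
def bReps (groups : PySem.Dict String (List (List (String × String)))) : List (List (String × String)) :=
  bucketPriority.filterMap (fun b => if groups.contains b then (groups.getD b []).head? else none)

-- B's dedup fill (`uniq`)
def bUniq : List (List (String × String)) → PySem.Set String → List (List (String × String))
  | [], _ => []
  | a :: rest, seen =>
    let s := stripSrc a
    if s == "" || PySem.Set.contains seen s then bUniq rest seen
    else a :: bUniq rest (PySem.Set.add seen s)

def pick_diverse_articles_py_alt (cluster : List (String × List (List (String × String)))) (max_articles : Int) : List (List (String × String)) :=
  let arts := PySem.List.sorted (((PySem.Dict.mk cluster).get? "articles").getD []) (fun a => pvGetS a "publishedAt") true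
  if max_articles ≤ 0 then []
  else
    let reps := bReps (bGroups arts PySem.Dict.empty)
    if (reps.length : Int) ≥ max_articles then PySem.List.slice reps none (some max_articles)
    else
      let seen := PySem.Set.ofList (reps.map stripSrc)
      reps ++ PySem.List.slice (bUniq arts seen) none (some (max_articles - (reps.length : Int)))

-- ===== PRECONDITION & SPEC =====

-- When max_articles <= 0 and the cluster has an article whose stripped source is a
-- Center source, A still returns that one article (its quota check runs only after
-- the first bucket), while B returns [] — the intended result for a non-positive quota.
def D_pick_diverse_articles_py (cluster : List (String × List (List (String × String)))) (max_articles : Int) : Prop :=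
  max_articles ≤ 0 ∧
    ∃ a ∈ (List.lookup "articles" cluster).getD [],
      PySem.Str.strip ((List.lookup "source" a).getD "") ∈
        (["Reuters", "Wall Street Journal", "Bloomberg", "CNBC", "Real Clear Politics"] : List String)
instance (cluster : List (String × List (List (String × String)))) (max_articles : Int) : Decidable (D_pick_diverse_articles_py cluster max_articles) := by unfold D_pick_diverse_articles_py; infer_instance

def Spec_pick_diverse_articles_py (cluster : List (String × List (List (String × String)))) (max_articles : Int) (out : List (List (String × String))) : Prop := ¬ D_pick_diverse_articles_py cluster max_articles → out = pick_diverse_articles_py_alt cluster max_articles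
instance (cluster : List (String × List (List (String × String)))) (max_articles : Int) (out : List (List (String × String))) : Decidable (Spec_pick_diverse_articles_py cluster max_articles out) := by unfold Spec_pick_diverse_articles_py; infer_instance

def pvDiffWitness_pick_diverse_articles_py : (List (String × List (List (String × String)))) × Int :=
  ([("articles", [[("source", "Reuters")]])], 0)
def pvDiffWitnessOut_pick_diverse_articles_py : (List (List (String × String))) × (List (List (String × String))) :=
  ([[("source", "Reuters")]], [])

-- ===== CLAIM (what is proved, stated in full; the proofs are below) =====
def Claim_unchanged_pick_diverse_articles_py : Prop := ∀ (cluster : List (String × List (List (String × String)))) (max_articles : Int), Dom_pick_diverse_articles_py cluster max_articles → Spec_pick_diverse_articles_py cluster max_articles (pick_diverse_articles_py cluster max_articles)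
def Claim_changed_pick_diverse_articles_py : Prop := Dom_pick_diverse_articles_py (pvDiffWitness_pick_diverse_articles_py.1) (pvDiffWitness_pick_diverse_articles_py.2) ∧ D_pick_diverse_articles_py (pvDiffWitness_pick_diverse_articles_py.1) (pvDiffWitness_pick_diverse_articles_py.2) ∧ pick_diverse_articles_py (pvDiffWitness_pick_diverse_articles_py.1) (pvDiffWitness_pick_diverse_articles_py.2) = pvDiffWitnessOut_pick_diverse_articles_py.1 ∧ pick_diverse_articles_py_alt (pvDiffWitness_pick_diverse_articles_py.1) (pvDiffWitness_pick_diverse_articles_py.2) = pvDiffWitnessOut_pick_diverse_articles_py.2 ∧ pvDiffWitnessOut_pick_diverse_articles_py.1 ≠ pvDiffWitnessOut_pick_diverse_articles_py.2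
def Claim_exact_pick_diverse_articles_py : Prop := ∀ (cluster : List (String × List (List (String × String)))) (max_articles : Int), Dom_pick_diverse_articles_py cluster max_articles → D_pick_diverse_articles_py cluster max_articles → pick_diverse_articles_py cluster max_articles ≠ pick_diverse_articles_py_alt cluster max_articles

-- ===== LEMMAS AND PROOFS =====

-- the predicate "article a belongs to bucket b and has a usable source", and
-- the "first article of bucket b" both versions compute
def predB (b : String) (a : List (String × String)) : Bool :=
  !(stripSrc a == "") && (bucketFor (stripSrc a) == b)

def pureFind (arts : List (List (String × String))) (b : String) : Option (List (String × String)) :=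
  arts.find? (predB b)

def repsOf (arts : List (List (String × String))) : List (List (String × String)) :=
  bucketPriority.filterMap (pureFind arts)

-- strip is idempotent -------------------------------------------------------
lemma dropWhile_dropWhile_self {α : Type} (p : α → Bool) (l : List α) :
    List.dropWhile p (List.dropWhile p l) = List.dropWhile p l := by
  induction l with
  | nil => simp
  | cons h t ih => by_cases hp : p h <;> simp [hp, ih]

lemma dropWhile_eq_self_of_prefix {α : Type} (p : α → Bool) {l z : List α}
    (hz : z <+: l) (hl : List.dropWhile p l = l) : List.dropWhile p z = z := by
  cases z with
  | nil => simp
  | cons c z' =>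
    obtain ⟨t, ht⟩ := hz
    have : ¬ p c = true := by
      intro hp
      rw [← ht, List.cons_append, List.dropWhile_cons_of_pos hp] at hl
      have hlen := congrArg List.length hl
      have hle := List.length_dropWhile_le p (z' ++ t)
      simp at hlen hle
      omega
    simp [this]

lemma strip_idem (s : String) : PySem.Str.strip (PySem.Str.strip s) = PySem.Str.strip s := by
  have key : ∀ cs : List Char, PySem.Chars.strip (PySem.Chars.strip cs) = PySem.Chars.strip cs := by
    intro cs
    show PySem.Chars.rstrip (PySem.Chars.lstrip (PySem.Chars.rstrip (PySem.Chars.lstrip cs)))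
        = PySem.Chars.rstrip (PySem.Chars.lstrip cs)
    set y := PySem.Chars.lstrip cs with hy
    have hyy : List.dropWhile PySem.Chars.isspace y = y := by
      simpa [PySem.Chars.lstrip] using dropWhile_dropWhile_self PySem.Chars.isspace cs
    have hpref : PySem.Chars.rstrip y <+: y := by
      unfold PySem.Chars.rstrip
      have hsuf : List.dropWhile PySem.Chars.isspace y.reverse <:+ y.reverse := List.dropWhile_suffix _
      have := List.reverse_prefix.mpr hsuf
      simpa using this
    have hls : PySem.Chars.lstrip (PySem.Chars.rstrip y) = PySem.Chars.rstrip y := by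
      unfold PySem.Chars.lstrip
      exact dropWhile_eq_self_of_prefix _ hpref hyy
    rw [hls]
    unfold PySem.Chars.rstrip
    rw [List.reverse_reverse, dropWhile_dropWhile_self]
  apply String.toList_inj.mp
  simp only [PySem.Str.toList_strip, key]

-- bucket characterisation ---------------------------------------------------
lemma bucketFind_eq_center {t : String} :
    bucketFind sourceBuckets t = "Center" ↔
      t ∈ (["Reuters", "Wall Street Journal", "Bloomberg", "CNBC", "Real Clear Politics"] : List String) := by
  constructor
  · intro h
    simp only [sourceBuckets, bucketFind] at h
    split_ifs at h with h1 h2 h3 h4 h5 h6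
    · exact absurd h (by decide)
    · exact (PySem.Set.mem_ofList _ _).mp ((PySem.Set.contains_iff _ _).mp h2)
    · exact absurd h (by decide)
    · exact absurd h (by decide)
    · exact absurd h (by decide)
    · exact absurd h (by decide)
    · exact absurd h (by decide)
  · intro h
    fin_cases h <;> decide

-- B's grouping pass ---------------------------------------------------------
lemma bGroups_getD (arts : List (List (String × String))) (d : PySem.Dict String (List (List (String × String)))) (b : String) :
    (bGroups arts d).getD b [] = d.getD b [] ++ arts.filter (predB b) := by
  induction arts generalizing d with
  | nil => simp [bGroups]
  | cons a rest ih =>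
    by_cases hs : stripSrc a = ""
    · have h1 : bGroups (a :: rest) d = bGroups rest d := by simp [bGroups, hs]
      have h2 : (a :: rest).filter (predB b) = rest.filter (predB b) := by
        simp [predB, hs]
      rw [h1, h2, ih]
    · have h1 : bGroups (a :: rest) d = bGroups rest (d.modify (bucketFor (stripSrc a)) [] (· ++ [a])) := by
        simp [bGroups, hs]
      by_cases hb : bucketFor (stripSrc a) = b
      · have h2 : (a :: rest).filter (predB b) = a :: rest.filter (predB b) := by
          simp [predB, hs, hb]
        rw [h1, h2, ih, hb, PySem.Dict.getD_modify_self]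
        simp
      · have h2 : (a :: rest).filter (predB b) = rest.filter (predB b) := by
          simp [predB, hb]
        rw [h1, h2, ih, PySem.Dict.getD_modify_of_ne _ _ _ (Ne.symm hb)]

lemma bGroups_contains (arts : List (List (String × String))) (d : PySem.Dict String (List (List (String × String)))) (b : String) :
    (bGroups arts d).contains b = (d.contains b || arts.any (predB b)) := by
  induction arts generalizing d with
  | nil => simp [bGroups]
  | cons a rest ih =>
    by_cases hs : stripSrc a = ""
    · have h1 : bGroups (a :: rest) d = bGroups rest d := by simp [bGroups, hs]
      have h2 : (a :: rest).any (predB b) = rest.any (predB b) := by simp [predB, hs]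
      rw [h1, h2, ih]
    · have h1 : bGroups (a :: rest) d = bGroups rest (d.modify (bucketFor (stripSrc a)) [] (· ++ [a])) := by
        simp [bGroups, hs]
      rw [h1, ih, PySem.Dict.contains_modify]
      by_cases hb : bucketFor (stripSrc a) = b
      · simp [predB, hs, hb]
      · have hbe : (b == bucketFor (stripSrc a)) = false := by
          simp [Ne.symm hb]
        have h2 : predB b a = false := by simp [predB, hb]
        simp [hbe, h2]

lemma bReps_eq (arts : List (List (String × String))) :
    bReps (bGroups arts PySem.Dict.empty) = repsOf arts := by
  unfold bReps repsOf
  apply List.filterMap_congr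
  intro b _
  rw [bGroups_contains, bGroups_getD]
  simp only [PySem.Dict.contains_empty, PySem.Dict.getD_empty, Bool.false_or, List.nil_append]
  by_cases hany : arts.any (predB b) = true
  · rw [if_pos hany, List.head?_filter]
    rfl
  · rw [if_neg hany]
    have : arts.find? (predB b) = none := by
      rw [List.find?_eq_none]
      intro x hx hp
      exact hany (List.any_eq_true.mpr ⟨x, hx, hp⟩)
    simpa [pureFind] using this.symm

-- A's first phase -----------------------------------------------------------
lemma aFind_eq_pureFind (arts : List (List (String × String))) (b : String) (used : PySem.Set String)
    (h : ∀ x ∈ used, bucketFor x ≠ b) : aFind arts b used = pureFind arts b := by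
  induction arts with
  | nil => simp [aFind, pureFind]
  | cons a rest ih =>
    by_cases hs : stripSrc a = ""
    · have h1 : aFind (a :: rest) b used = aFind rest b used := by simp [aFind, hs]
      have h2 : pureFind (a :: rest) b = pureFind rest b := by simp [pureFind, predB, hs]
      rw [h1, h2, ih]
    · by_cases hc : PySem.Set.contains used (stripSrc a) = true
      · have hmem : stripSrc a ∈ used := (PySem.Set.contains_iff _ _).mp hc
        have hne : bucketFor (stripSrc a) ≠ b := h _ hmem
        have h1 : aFind (a :: rest) b used = aFind rest b used := by
          simp [aFind]
          intro _ hnm _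
          exact absurd hmem hnm
        have h2 : pureFind (a :: rest) b = pureFind rest b := by simp [pureFind, predB, hne]
        rw [h1, h2, ih]
      · have hnm : stripSrc a ∉ used := by simpa using hc
        by_cases hb : bucketFor (stripSrc a) = b
        · have h1 : aFind (a :: rest) b used = some a := by simp [aFind, hs, hnm, hb]
          have h2 : pureFind (a :: rest) b = some a := by simp [pureFind, predB, hs, hb]
          rw [h1, h2]
        · have h1 : aFind (a :: rest) b used = aFind rest b used := by simp [aFind, hs, hnm, hb]
          have h2 : pureFind (a :: rest) b = pureFind rest b := by simp [pureFind, predB, hb]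
          rw [h1, h2, ih]

lemma phase1_closed (arts : List (List (String × String))) (m : Int) :
    ∀ (bs : List String), bs.Nodup → ∀ (picked : List (List (String × String))) (used : PySem.Set String),
    (∀ x ∈ used, bucketFor x ∉ bs) → (picked.length : Int) < m →
    aPhase1 arts bs picked used m =
      (if ((picked.length : Int) + ((bs.filterMap (pureFind arts)).length : Int) ≥ m)
       then .inl (picked ++ (bs.filterMap (pureFind arts)).take (m - (picked.length : Int)).toNat)
       else .inr (picked ++ bs.filterMap (pureFind arts),
                  (bs.filterMap (pureFind arts)).foldl (fun u a => PySem.Set.add u (stripSrc a)) used)) := by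
  intro bs
  induction bs with
  | nil =>
    intro _ picked used _ hlt
    simp only [aPhase1, List.filterMap_nil, List.length_nil, List.append_nil, List.foldl_nil]
    rw [if_neg (by push_cast; omega)]
  | cons b bs ih =>
    intro hnd picked used h hlt
    have hb : ∀ x ∈ used, bucketFor x ≠ b := fun x hx he => h x hx (he ▸ List.mem_cons_self ..)
    have hbs : ∀ x ∈ used, bucketFor x ∉ bs := fun x hx hm => h x hx (List.mem_cons_of_mem _ hm)
    have hfind : aFind arts b used = pureFind arts b := aFind_eq_pureFind arts b used hb
    cases hp : pureFind arts b with
    | none =>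
      have hstep : aPhase1 arts (b :: bs) picked used m = aPhase1 arts bs picked used m := by
        simp [aPhase1, hfind, hp, show ¬ ((picked.length : Int) ≥ m) by omega]
      rw [hstep, ih hnd.of_cons picked used hbs hlt, List.filterMap_cons_none hp]
    | some a =>
      have hba : bucketFor (stripSrc a) = b := by
        have hpred := List.find?_some hp
        simp only [predB, Bool.and_eq_true, beq_iff_eq, Bool.not_eq_eq_eq_not] at hpred
        exact hpred.2
      rw [List.filterMap_cons_some hp]
      by_cases hm1 : ((picked.length : Int) + 1 ≥ m)
      · have hstep : aPhase1 arts (b :: bs) picked used m = .inl (picked ++ [a]) := by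
          simp [aPhase1, hfind, hp]
          intro hx; exact absurd hx (by omega)
        have hcond : (picked.length : Int) + ((a :: bs.filterMap (pureFind arts)).length : Int) ≥ m := by
          simp; omega
        rw [hstep, if_pos hcond]
        have h1 : (m - (picked.length : Int)).toNat = 1 := by omega
        rw [h1, List.take_succ_cons, List.take_zero]
      · have hstep : aPhase1 arts (b :: bs) picked used m =
            aPhase1 arts bs (picked ++ [a]) (PySem.Set.add used (stripSrc a)) m := by
          simp [aPhase1, hfind, hp]
          intro hx; exact absurd hx (by omega)
        have hused' : ∀ x ∈ PySem.Set.add used (stripSrc a), bucketFor x ∉ bs := by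
          intro x hx
          rcases (PySem.Set.mem_add _ _ _).mp hx with hx' | hx'
          · exact hbs x hx'
          · rw [hx', hba]
            exact (List.nodup_cons.mp hnd).1
        have hlt' : (((picked ++ [a]).length : Int)) < m := by simp; omega
        rw [hstep, ih hnd.of_cons _ _ hused' hlt']
        have hlen : (((picked ++ [a]).length : Int)) = (picked.length : Int) + 1 := by simp
        have hcond : ((((picked ++ [a]).length : Int)) + ((bs.filterMap (pureFind arts)).length : Int) ≥ m)
            ↔ ((picked.length : Int) + ((a :: bs.filterMap (pureFind arts)).length : Int) ≥ m) := by
          simp; omega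
        by_cases hc2 : ((picked.length : Int) + ((a :: bs.filterMap (pureFind arts)).length : Int) ≥ m)
        · rw [if_pos (hcond.mpr hc2), if_pos hc2]
          have hk : (m - (picked.length : Int)).toNat = (m - (((picked ++ [a]).length : Int))).toNat + 1 := by
            rw [hlen]; omega
          rw [hk, List.take_succ_cons, List.append_cons, List.append_assoc]
          simp
        · rw [if_neg (fun hx => hc2 (hcond.mp hx)), if_neg hc2]
          simp

-- A's fill loop is B's dedup plus a take ------------------------------------
lemma fill_eq (m : Int) :
    ∀ (arts picked : List (List (String × String))) (used : PySem.Set String),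
    aFill arts picked used m = picked ++ List.take (m - (picked.length : Int)).toNat (bUniq arts used) := by
  intro arts
  induction arts with
  | nil => intro picked used; simp [aFill, bUniq]
  | cons a rest ih =>
    intro picked used
    by_cases hge : (picked.length : Int) ≥ m
    · have h0 : (m - (picked.length : Int)).toNat = 0 := by omega
      rw [h0]
      simp only [aFill, if_pos hge, List.take_zero, List.append_nil]
    · by_cases hs : stripSrc a = ""
      · have ha : aFill (a :: rest) picked used m = aFill rest picked used m := by
          simp [aFill, hge, hs]
        have hu : bUniq (a :: rest) used = bUniq rest used := by simp [bUniq, hs]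
        rw [ha, hu, ih]
      · by_cases hc : stripSrc a ∈ used
        · have ha : aFill (a :: rest) picked used m = aFill rest picked used m := by
            simp [aFill, hge, hc]
          have hu : bUniq (a :: rest) used = bUniq rest used := by simp [bUniq, hc]
          rw [ha, hu, ih]
        · have ha : aFill (a :: rest) picked used m = aFill rest (picked ++ [a]) (PySem.Set.add used (stripSrc a)) m := by
            simp [aFill, hge, hs, hc]
          have hu : bUniq (a :: rest) used = a :: bUniq rest (PySem.Set.add used (stripSrc a)) := by
            simp [bUniq, hs, hc]
          have hk : (m - (picked.length : Int)).toNat = (m - ((picked ++ [a]).length : Int)).toNat + 1 := by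
            simp only [List.length_append, List.length_cons, List.length_nil]
            push_cast
            omega
          rw [ha, ih, hu, hk, List.take_succ_cons]
          simp

lemma centerStr_mem_of_predB {x : List (String × String)} (hp : predB "Center" x = true) :
    PySem.Str.strip (((PySem.Dict.mk x).get? "source").getD "") ∈
      (["Reuters", "Wall Street Journal", "Bloomberg", "CNBC", "Real Clear Politics"] : List String) := by
  simp only [predB, Bool.and_eq_true, beq_iff_eq] at hp
  have hbk : bucketFor (stripSrc x) = "Center" := hp.2
  unfold bucketFor at hbk
  rw [show PySem.Str.strip (stripSrc x) = stripSrc x from strip_idem _] at hbk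
  simpa [stripSrc, pvGetS] using bucketFind_eq_center.mp hbk

lemma predB_center_of_mem {x : List (String × String)}
    (hmem : PySem.Str.strip (((PySem.Dict.mk x).get? "source").getD "") ∈
      (["Reuters", "Wall Street Journal", "Bloomberg", "CNBC", "Real Clear Politics"] : List String)) :
    predB "Center" x = true := by
  have hmem' : stripSrc x ∈ (["Reuters", "Wall Street Journal", "Bloomberg", "CNBC", "Real Clear Politics"] : List String) := by
    simpa [stripSrc, pvGetS] using hmem
  have hne : ¬ (stripSrc x = "") := by
    intro he
    rw [he] at hmem'
    simp at hmem'
  have hstrip : PySem.Str.strip (stripSrc x) = stripSrc x := strip_idem _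
  have hbk : bucketFor (stripSrc x) = "Center" := by
    unfold bucketFor
    rw [hstrip]
    exact bucketFind_eq_center.mpr hmem'
  simp [predB, hne, hbk]

lemma lookup_eq_get? {ν : Type} (l : List (String × ν)) (k : String) :
    List.lookup k l = (PySem.Dict.mk l).get? k := by
  induction l with
  | nil => rfl
  | cons p rest ih =>
    rw [show p = (p.1, p.2) from rfl, PySem.Dict.get?_mk_cons, List.lookup_cons]
    by_cases h : (p.1 == k) = true
    · have h' : (k == p.1) = true := beq_iff_eq.mpr (beq_iff_eq.mp h).symm
      rw [h', h]
      rfl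
    · have h' : (k == p.1) = false := by simp at h ⊢; exact fun he => h he.symm
      rw [h', Bool.eq_false_iff.mpr h]
      simpa using ih

lemma empty_no_mem (x : String) (hx : x ∈ (PySem.Set.empty : PySem.Set String)) : False := by
  simp [PySem.Set.empty] at hx

-- proof-only repackaging of the two ports' bodies (definitionally equal to them)
def aBody (arts : List (List (String × String))) (m : Int) : List (List (String × String)) :=
  if arts.isEmpty then []
  else
    match aPhase1 arts bucketPriority [] PySem.Set.empty m with
    | .inl p => p
    | .inr (picked, used) => aFill arts picked used m

def bBody (arts : List (List (String × String))) (m : Int) : List (List (String × String)) :=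
  if m ≤ 0 then []
  else
    let reps := bReps (bGroups arts PySem.Dict.empty)
    if (reps.length : Int) ≥ m then PySem.List.slice reps none (some m)
    else
      let seen := PySem.Set.ofList (reps.map stripSrc)
      reps ++ PySem.List.slice (bUniq arts seen) none (some (m - (reps.length : Int)))

lemma aPhase1_cons_none {arts : List (List (String × String))} {b : String} {bs : List String}
    {picked : List (List (String × String))} {used : PySem.Set String} {m : Int}
    (h : aFind arts b used = none) (hge : (picked.length : Int) ≥ m) :
    aPhase1 arts (b :: bs) picked used m = .inl picked := by
  unfold aPhase1
  rw [h]
  simp [hge]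

lemma aPhase1_cons_some {arts : List (List (String × String))} {b : String} {bs : List String}
    {picked : List (List (String × String))} {used : PySem.Set String} {m : Int}
    {a : List (String × String)} (h : aFind arts b used = some a)
    (hge : (((picked ++ [a]).length : Int)) ≥ m) :
    aPhase1 arts (b :: bs) picked used m = .inl (picked ++ [a]) := by
  unfold aPhase1
  rw [h]
  simp only [ge_iff_le, if_pos (by exact hge)]

lemma core (arts : List (List (String × String))) (m : Int)
    (hnc : m ≤ 0 → arts.find? (predB "Center") = none) :
    aBody arts m = bBody arts m := by
  by_cases hm : m ≤ 0
  · unfold bBody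
    rw [if_pos hm]
    unfold aBody
    cases arts with
    | nil => simp
    | cons a0 rest =>
      have hfind0 : aFind (a0 :: rest) "Center" PySem.Set.empty = none := by
        rw [aFind_eq_pureFind _ _ _ (fun x hx => absurd (empty_no_mem x hx) not_false)]
        exact hnc hm
      have hP : aPhase1 (a0 :: rest) bucketPriority [] PySem.Set.empty m = .inl [] := by
        rw [show bucketPriority = "Center" :: ["Center/Left", "Center/Right", "International", "Independent", "Tech/Science", "Other"] from rfl]
        exact aPhase1_cons_none hfind0 (by simp; omega)
      simp only [List.isEmpty_cons, Bool.false_eq_true, if_false]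
      rw [hP]
  · cases arts with
    | nil =>
      unfold aBody bBody
      rw [if_neg hm, bReps_eq]
      have hreps : repsOf ([] : List (List (String × String))) = [] := by
        simp [repsOf, pureFind]
      rw [hreps]
      rw [if_neg (show ¬ (((([] : List (List (String × String))).length : Int)) ≥ m) by simp; omega)]
      simp [bUniq]
      rw [PySem.List.slice_to _ (by omega : (0:Int) ≤ m)]
      simp
    | cons a0 rest =>
      unfold aBody bBody
      rw [if_neg hm, bReps_eq]
      have h0lt : (0 : Int) < m := by omega
      simp only [List.isEmpty_cons, Bool.false_eq_true, if_false]
      have hcl := phase1_closed (a0 :: rest) m bucketPriority (by decide) [] PySem.Set.empty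
        (fun x hx => absurd (empty_no_mem x hx) not_false) (by simpa using h0lt)
      rw [show repsOf (a0 :: rest) = bucketPriority.filterMap (pureFind (a0 :: rest)) from rfl]
      by_cases hlen : (((bucketPriority.filterMap (pureFind (a0 :: rest))).length : Int) ≥ m)
      · rw [hcl, if_pos (by simpa using hlen), if_pos hlen]
        simp only [List.nil_append]
        rw [PySem.List.slice_to _ (by omega : (0:Int) ≤ m)]
        norm_num
      · rw [hcl, if_neg (by simpa using hlen), if_neg hlen]
        simp only [List.nil_append]
        rw [fill_eq, PySem.List.slice_to _ (by omega : (0:Int) ≤ m - ((bucketPriority.filterMap (pureFind (a0 :: rest))).length : Int))]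
        rw [PySem.Set.ofList_eq_foldl, List.foldl_map]
        rfl

lemma coreA_center (arts : List (List (String × String))) (m : Int) (hm : m ≤ 0)
    (a' : List (String × String)) (hf : arts.find? (predB "Center") = some a') :
    aBody arts m = [a'] := by
  cases arts with
  | nil => simp at hf
  | cons a0 rest =>
    have hfind0 : aFind (a0 :: rest) "Center" PySem.Set.empty = some a' := by
      rw [aFind_eq_pureFind _ _ _ (fun x hx => absurd (empty_no_mem x hx) not_false)]
      exact hf
    have hP : aPhase1 (a0 :: rest) bucketPriority [] PySem.Set.empty m = .inl [a'] := by
      rw [show bucketPriority = "Center" :: ["Center/Left", "Center/Right", "International", "Independent", "Tech/Science", "Other"] from rfl]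
      exact aPhase1_cons_some hfind0 (by simp; omega)
    unfold aBody
    simp only [List.isEmpty_cons, Bool.false_eq_true, if_false]
    rw [hP]

-- ===== VERDICT (by name: the statements are the Claim_ definitions above) =====
theorem pick_diverse_articles_py_spec : Claim_unchanged_pick_diverse_articles_py := by
  intro cluster m _ hnd
  unfold D_pick_diverse_articles_py at hnd
  show pick_diverse_articles_py cluster m = pick_diverse_articles_py_alt cluster m
  rw [show pick_diverse_articles_py cluster m
      = aBody (PySem.List.sorted (((PySem.Dict.mk cluster).get? "articles").getD []) (fun a => pvGetS a "publishedAt") true) m from rfl,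
    show pick_diverse_articles_py_alt cluster m
      = bBody (PySem.List.sorted (((PySem.Dict.mk cluster).get? "articles").getD []) (fun a => pvGetS a "publishedAt") true) m from rfl]
  apply core
  intro hm
  rw [List.find?_eq_none]
  intro x hx hp
  have hx' : x ∈ ((PySem.Dict.mk cluster).get? "articles").getD [] :=
    (PySem.List.mem_sorted _ _ _ _).mp hx
  rw [lookup_eq_get?] at hnd
  exact hnd ⟨hm, ⟨x, hx', by rw [lookup_eq_get?]; exact centerStr_mem_of_predB hp⟩⟩

theorem pick_diverse_articles_py_changed : Claim_changed_pick_diverse_articles_py := by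
  unfold Claim_changed_pick_diverse_articles_py; decide

theorem pick_diverse_articles_py_tight : Claim_exact_pick_diverse_articles_py := by
  intro cluster m _ hd
  obtain ⟨hm, hany⟩ := hd
  have hB : pick_diverse_articles_py_alt cluster m = [] := by
    rw [show pick_diverse_articles_py_alt cluster m
        = bBody (PySem.List.sorted (((PySem.Dict.mk cluster).get? "articles").getD []) (fun a => pvGetS a "publishedAt") true) m from rfl]
    unfold bBody
    rw [if_pos hm]
  rw [hB]
  rw [lookup_eq_get?] at hany
  obtain ⟨a, ha, hmem⟩ := hany
  rw [lookup_eq_get?] at hmem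
  have hmemA : a ∈ PySem.List.sorted (((PySem.Dict.mk cluster).get? "articles").getD []) (fun a => pvGetS a "publishedAt") true :=
    (PySem.List.mem_sorted _ _ _ _).mpr ha
  have hsome : ((PySem.List.sorted (((PySem.Dict.mk cluster).get? "articles").getD []) (fun a => pvGetS a "publishedAt") true).find? (predB "Center")).isSome := by
    rw [List.find?_isSome]
    exact ⟨a, hmemA, predB_center_of_mem (by simpa using hmem)⟩
  obtain ⟨a', ha'⟩ := Option.isSome_iff_exists.mp hsome
  rw [show pick_diverse_articles_py cluster m
      = aBody (PySem.List.sorted (((PySem.Dict.mk cluster).get? "articles").getD []) (fun a => pvGetS a "publishedAt") true) m from rfl,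
    coreA_center _ m hm a' ha']
  simp
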